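-- pv_equiv track=rewrite | github.com/cometadata/generic-resource-type-classification | rtg_cluster/rtg_cluster.py | is_likely_english_heuristic
-- ===== SOURCE A (Python) =====
-- def is_likely_english_heuristic(text):
--     if not text or not isinstance(text, str) or not text.strip():
--         return False
--     try:
--         text.encode('ascii')
--     except UnicodeEncodeError:
--         return False
--     if not any(char.isalpha() for char in text):
--         return False
--     return True
-- ===== SOURCE B (Python) =====
-- _ASCII = frozenset(map(chr, range(128)))
-- _ALPHA = frozenset('abcdefghijklmnopqrstuvwxyzABCDEFGHIJKLMNOPQRSTUVWXYZ')
--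
--
-- def is_likely_english_heuristic(text):
--     if not isinstance(text, str):
--         return False
--     chars = set(text)
--     return chars <= _ASCII and not chars.isdisjoint(_ALPHA)
-- ===== Notes on version B (the rewrite author's own statement) =====
-- stated objective: alternative
-- what changed: B drops the empty/blank guards and the encode try/except entirely and reformulates the predicate as set algebra over the distinct characters: set(text) must be a subset of the ASCII character set and must intersect the letter set (an ASCII letter is never whitespace, so 'has a letter' already implies the nonempty and non-blank guards).
import Mathlib
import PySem

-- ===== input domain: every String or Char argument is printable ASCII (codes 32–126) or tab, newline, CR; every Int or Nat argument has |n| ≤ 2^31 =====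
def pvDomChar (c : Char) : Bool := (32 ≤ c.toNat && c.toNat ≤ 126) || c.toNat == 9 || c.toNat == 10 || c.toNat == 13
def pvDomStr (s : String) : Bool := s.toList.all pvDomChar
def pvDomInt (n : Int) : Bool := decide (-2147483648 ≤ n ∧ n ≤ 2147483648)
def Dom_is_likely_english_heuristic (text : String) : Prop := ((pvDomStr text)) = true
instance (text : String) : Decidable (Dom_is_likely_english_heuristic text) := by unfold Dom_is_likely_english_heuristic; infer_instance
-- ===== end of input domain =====

-- B reformulates the heuristic as set algebra over the DISTINCT characters (set(text) ⊆ ASCII and set(text) ∩ letters ≠ ∅),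
-- dropping the empty/blank guards and the encode try/except, since an ASCII letter is never whitespace (objective: alternative).

-- ===== PORT A =====
def is_likely_english_heuristic (text : String) : Bool :=
  -- 'if not text or not isinstance(text, str) or not text.strip(): return False'
  if text.toList.isEmpty || (PySem.Str.strip text).toList.isEmpty then false
  -- 'text.encode('ascii')' raises UnicodeEncodeError iff some character's code point is > 127 (exact for str)
  else if text.toList.any (fun c => c.toNat > 127) then false
  -- 'if not any(char.isalpha() for char in text): return False'
  else if !(text.toList.any PySem.Chars.isalpha) then false
  else true

-- ===== PORT B =====
-- _ASCII = frozenset(map(chr, range(128)))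
def asciiChars : PySem.Set Char := PySem.Set.ofList ((List.range 128).map Char.ofNat)
-- _ALPHA = frozenset('abcdefghijklmnopqrstuvwxyzABCDEFGHIJKLMNOPQRSTUVWXYZ')
def alphaChars : PySem.Set Char := PySem.Set.ofList "abcdefghijklmnopqrstuvwxyzABCDEFGHIJKLMNOPQRSTUVWXYZ".toList

def is_likely_english_heuristic_alt (text : String) : Bool :=
  -- 'chars = set(text)'
  let chars : PySem.Set Char := PySem.Set.ofList text.toList
  -- 'return chars <= _ASCII and not chars.isdisjoint(_ALPHA)'
  PySem.Set.issubset chars asciiChars && !(PySem.Set.isdisjoint chars alphaChars)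

-- ===== PRECONDITION & SPEC =====
def Spec_is_likely_english_heuristic (text : String) (out : Bool) : Prop := out = is_likely_english_heuristic_alt text
instance (text : String) (out : Bool) : Decidable (Spec_is_likely_english_heuristic text out) := by unfold Spec_is_likely_english_heuristic; infer_instance

-- ===== CLAIM (what is proved, stated in full; the proofs are below) =====
def Claim_equal_is_likely_english_heuristic : Prop := ∀ (text : String), Dom_is_likely_english_heuristic text → Spec_is_likely_english_heuristic text (is_likely_english_heuristic text)

-- ===== LEMMAS AND PROOFS =====
lemma char_eq_of_toNat_eq (a b : Char) (h : a.toNat = b.toNat) : a = b := by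
  apply Char.ext; exact UInt32.toNat_inj.mp h

set_option maxRecDepth 8192 in
lemma alpha_toNat_list :
    (alphaChars : List Char).map Char.toNat =
      [97, 98, 99, 100, 101, 102, 103, 104, 105, 106, 107, 108, 109, 110, 111, 112, 113,
       114, 115, 116, 117, 118, 119, 120, 121, 122, 65, 66, 67, 68, 69, 70, 71, 72, 73,
       74, 75, 76, 77, 78, 79, 80, 81, 82, 83, 84, 85, 86, 87, 88, 89, 90] := by decide

lemma isalpha_iff_toNat (c : Char) :
    PySem.Chars.isalpha c = true ↔ (65 ≤ c.toNat ∧ c.toNat ≤ 90) ∨ (97 ≤ c.toNat ∧ c.toNat ≤ 122) := by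
  simp only [PySem.Chars.isalpha, PySem.Chars.isupper, PySem.Chars.islower, Char.le_def,
    UInt32.le_iff_toNat_le, Bool.or_eq_true, Bool.and_eq_true, decide_eq_true_eq, Char.toNat]
  rw [show ('A'.val.toNat = 65) from rfl, show ('Z'.val.toNat = 90) from rfl,
      show ('a'.val.toNat = 97) from rfl, show ('z'.val.toNat = 122) from rfl]

lemma mem_alpha_iff (c : Char) : c ∈ (alphaChars : List Char) ↔ PySem.Chars.isalpha c = true := by
  constructor
  · intro h
    have hm : c.toNat ∈ (alphaChars : List Char).map Char.toNat := List.mem_map_of_mem h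
    rw [alpha_toNat_list] at hm
    simp only [List.mem_cons, List.not_mem_nil, or_false] at hm
    rw [isalpha_iff_toNat]
    omega
  · intro h
    have hb := (isalpha_iff_toNat c).mp h
    have hm : c.toNat ∈ (alphaChars : List Char).map Char.toNat := by
      rw [alpha_toNat_list]
      simp only [List.mem_cons, List.not_mem_nil, or_false]
      omega
    obtain ⟨d, hd, hdc⟩ := List.mem_map.mp hm
    exact (char_eq_of_toNat_eq c d hdc.symm) ▸ hd

lemma mem_ascii_of_dom (c : Char) (h : pvDomChar c = true) : c ∈ (asciiChars : List Char) := by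
  have hlt : c.toNat < 128 := by
    simp only [pvDomChar, Bool.or_eq_true, Bool.and_eq_true, decide_eq_true_eq, beq_iff_eq] at h
    omega
  have : Char.ofNat c.toNat ∈ (List.range 128).map Char.ofNat :=
    List.mem_map_of_mem (List.mem_range.mpr hlt)
  rw [Char.ofNat_toNat] at this
  have hnd : ((List.range 128).map Char.ofNat).Nodup := by
    set_option maxRecDepth 8192 in decide
  simpa [asciiChars, PySem.Set.ofList_eq_self_of_nodup _ hnd] using this

lemma not_isspace_of_isalpha (c : Char) (h : PySem.Chars.isalpha c = true) :
    PySem.Chars.isspace c = false := by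
  have hb := (isalpha_iff_toNat c).mp h
  simp only [PySem.Chars.isspace, Bool.or_eq_false_iff, Bool.and_eq_false_iff,
    decide_eq_false_iff_not]
  omega

lemma all_space_of_strip_nil (cs : List Char) (h : PySem.Chars.strip cs = []) :
    ∀ c ∈ cs, PySem.Chars.isspace c = true := by
  intro c hc
  have hx : ∀ d ∈ List.dropWhile PySem.Chars.isspace cs, PySem.Chars.isspace d = true := by
    intro d hd
    have : List.dropWhile PySem.Chars.isspace
        (List.dropWhile PySem.Chars.isspace cs).reverse = [] := by
      simpa [PySem.Chars.strip, PySem.Chars.rstrip, PySem.Chars.lstrip] using h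
    exact List.dropWhile_eq_nil_iff.mp this d (List.mem_reverse.mpr hd)
  rcases List.mem_append.mp
      ((List.takeWhile_append_dropWhile (p := PySem.Chars.isspace) (l := cs)) ▸ hc) with ht | hd
  · exact List.mem_takeWhile_imp ht
  · exact hx c hd

-- ===== VERDICT (by name: the statement is the Claim_ definition above) =====
theorem is_likely_english_heuristic_spec : Claim_equal_is_likely_english_heuristic := by
  intro text hdom
  unfold Spec_is_likely_english_heuristic is_likely_english_heuristic is_likely_english_heuristic_alt
  have hdom' : ∀ c ∈ text.toList, pvDomChar c = true := by
    simpa [Dom_is_likely_english_heuristic, pvDomStr, List.all_eq_true] using hdom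
  -- under Dom, every character is ASCII: the encode branch of A and the subset test of B
  have hascii : text.toList.any (fun c => c.toNat > 127) = false := by
    simp only [List.any_eq_false, decide_eq_true_eq, not_lt]
    intro c hc
    have := hdom' c hc
    simp only [pvDomChar, Bool.or_eq_true, Bool.and_eq_true, decide_eq_true_eq, beq_iff_eq] at this
    omega
  have hsub : PySem.Set.issubset (PySem.Set.ofList text.toList) asciiChars = true := by
    rw [PySem.Set.issubset_iff]
    intro c hc
    exact mem_ascii_of_dom c (hdom' c ((PySem.Set.mem_ofList _ _).mp hc))
  -- B's intersection test is exactly "some character is a letter"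
  have hdisj : (!(PySem.Set.isdisjoint (PySem.Set.ofList text.toList) alphaChars)) =
      text.toList.any PySem.Chars.isalpha := by
    rcases hany : text.toList.any PySem.Chars.isalpha with _ | _
    · simp only [List.any_eq_false] at hany
      simp only [Bool.not_eq_false', PySem.Set.isdisjoint_iff]
      intro c hc
      rw [mem_alpha_iff]
      exact fun h => hany c ((PySem.Set.mem_ofList _ _).mp hc) h
    · simp only [List.any_eq_true] at hany
      obtain ⟨c, hc, hca⟩ := hany
      simp only [Bool.not_eq_true', Bool.eq_false_iff]
      intro hdis
      rw [PySem.Set.isdisjoint_iff] at hdis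
      exact hdis c ((PySem.Set.mem_ofList _ _).mpr hc) ((mem_alpha_iff c).mpr hca)
  show _ = ((PySem.Set.ofList text.toList).issubset asciiChars &&
      !(PySem.Set.ofList text.toList).isdisjoint alphaChars)
  rw [hsub, hdisj, hascii]
  by_cases hguard : (text.toList.isEmpty || (PySem.Str.strip text).toList.isEmpty) = true
  · -- A returns False on the guards; then no character can be a letter
    rw [if_pos hguard]
    rcases Bool.or_eq_true_iff.mp hguard with he | hs
    · simp [List.isEmpty_iff.mp he]
    · have hstrip : PySem.Chars.strip text.toList = [] := by
        simpa [PySem.Str.toList_strip] using List.isEmpty_iff.mp hs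
      have hall := all_space_of_strip_nil text.toList hstrip
      symm
      simp only [Bool.true_and, List.any_eq_false]
      intro c hc hca
      exact absurd (hall c hc) (by simp [not_isspace_of_isalpha c hca])
  · rw [if_neg hguard, if_neg (by simp)]
    rcases hany : text.toList.any PySem.Chars.isalpha <;> simp_all
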